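-- pv_equiv track=rewrite | github.com/kshah117/leetcode_solutions | find-unique-binary-string.py | findDifferentBinaryString
-- ===== SOURCE A (Python) =====
-- from typing import List
--
-- def findDifferentBinaryString(nums: List[str]) -> str:
--     N = len(nums)
--
--     def helper(s):
--         if len(s) > N:
--             return
--
--         if len(s) == N and s not in nums:
--             return s
--
--         for i in ["0", "1"]:
--             temp = s + i
--             val = helper(temp)
--             if val:
--                 return val
--
--     return helper("")
-- ===== SOURCE B (Python) =====
-- def findDifferentBinaryString(nums):
--     present = set(nums)
--     n = len(nums)
--     # among the n+1 numerically smallest length-n binary strings at least one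
--     # is absent (pigeonhole), and numeric order = lexicographic order
--     for k in range(n + 1):
--         s = ""
--         x = k
--         for _ in range(n):
--             s = ("1" if x % 2 else "0") + s
--             x //= 2
--         if s not in present:
--             return s
-- ===== Notes on version B (the rewrite author's own statement) =====
-- stated objective: faster
-- what changed: Replaces A's exponential DFS over all binary strings with a direct scan of the n+1 numerically smallest length-n binary strings against a hash set (pigeonhole guarantees one is absent).
import Mathlib
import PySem

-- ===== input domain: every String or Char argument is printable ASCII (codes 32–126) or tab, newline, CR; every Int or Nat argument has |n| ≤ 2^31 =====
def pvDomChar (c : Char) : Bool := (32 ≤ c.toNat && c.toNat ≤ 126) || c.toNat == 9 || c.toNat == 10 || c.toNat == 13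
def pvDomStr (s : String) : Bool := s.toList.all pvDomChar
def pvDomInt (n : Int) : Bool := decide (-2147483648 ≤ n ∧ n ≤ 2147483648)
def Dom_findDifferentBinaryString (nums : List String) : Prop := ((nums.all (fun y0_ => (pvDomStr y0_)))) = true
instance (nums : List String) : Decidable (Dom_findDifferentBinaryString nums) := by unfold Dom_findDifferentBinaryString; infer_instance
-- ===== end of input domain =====

-- B replaces A's exponential DFS over all length-N binary strings by a scan of the
-- N+1 numerically smallest length-N binary strings against a hash set (pigeonhole).

-- ===== PORT A =====
-- Python truthiness test `if val:` on an optional string: an empty string is falsy.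
def pvTruthy (o : Option (List Char)) : Option (List Char) :=
  match o with
  | some v => if v.length = 0 then none else some v
  | none => none

-- fuel = N + 1 - len(s) is only a structural totality guard: the DFS stops at depth N + 1,
-- so the fuel-0 branch is never reached from the top-level call below.
def pvAHelper (nums : List String) (N : Nat) : Nat → List Char → Option (List Char)
  | 0, _ => none
  | fuel+1, s =>
    if s.length > N then none
    else if s.length = N ∧ String.ofList s ∉ nums then some s
    else -- for i in ["0", "1"]: if val: return val;  fall through to None
      (pvTruthy (pvAHelper nums N fuel (s ++ ['0']))).or (pvTruthy (pvAHelper nums N fuel (s ++ ['1'])))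

def findDifferentBinaryString (nums : List String) : Option String :=
  (pvAHelper nums nums.length (nums.length + 1) []).map String.ofList

-- ===== PORT B =====
-- inner loop: for _ in range(n): s = ('1' if x % 2 else '0') + s; x //= 2
def pvBBits (n : Nat) (k : Int) : List Char :=
  ((List.range n).foldl
    (fun (sx : List Char × Int) _ =>
      ((if PySem.Int.mod sx.2 2 ≠ 0 then '1' else '0') :: sx.1, PySem.Int.floordiv sx.2 2))
    ([], k)).1

-- outer loop: for k in range(n+1): if s not in present: return s
def pvBLoop (present : List String) (n : Nat) : List Int → Option String
  | [] => none
  | k :: ks =>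
    let s := String.ofList (pvBBits n k)
    if PySem.Set.contains present s then pvBLoop present n ks else some s

def findDifferentBinaryString_alt (nums : List String) : Option String :=
  let present := PySem.Set.ofList nums
  let n := nums.length
  pvBLoop present n (PySem.List.pyRange 0 ((n : Int) + 1) 1)

-- ===== PRECONDITION & SPEC =====
def Spec_findDifferentBinaryString (nums : List String) (out : Option String) : Prop := out = findDifferentBinaryString_alt nums
instance (nums : List String) (out : Option String) : Decidable (Spec_findDifferentBinaryString nums out) := by unfold Spec_findDifferentBinaryString; infer_instance

-- ===== CLAIM (what is proved, stated in full; the proofs are below) =====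
def Claim_equal_findDifferentBinaryString : Prop := ∀ (nums : List String), Dom_findDifferentBinaryString nums → Spec_findDifferentBinaryString nums (findDifferentBinaryString nums)

-- ===== LEMMAS AND PROOFS =====

-- the length-N binary string for k (k < 2^N), most significant bit first
def natBits : Nat → Nat → List Char
  | 0, _ => []
  | d+1, k => (if k < 2^d then '0' else '1') :: natBits d (k % 2^d)

-- all length-N extensions of s, in A's DFS (= lexicographic) order (fuel-guarded like pvAHelper)
def cands (N : Nat) : Nat → List Char → List (List Char)
  | 0, _ => []
  | fuel+1, s =>
    if s.length > N then []
    else if s.length = N then [s]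
    else cands N fuel (s ++ ['0']) ++ cands N fuel (s ++ ['1'])

theorem pvAHelper_gt (nums : List String) {N : Nat} (fuel : Nat) {s : List Char}
    (h : s.length > N) : pvAHelper nums N fuel s = none := by
  cases fuel with
  | zero => rfl
  | succ fuel => rw [pvAHelper, if_pos h]

theorem cands_length : ∀ (fuel N : Nat) (s t : List Char), t ∈ cands N fuel s → t.length = N := by
  intro fuel
  induction fuel with
  | zero => intro N s t ht; simp [cands] at ht
  | succ fuel ih =>
    intro N s t ht
    rw [cands] at ht
    by_cases h : s.length > N
    · simp [if_pos h] at ht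
    · by_cases hN : s.length = N
      · simp only [if_neg h, if_pos hN, List.mem_singleton] at ht
        subst ht; omega
      · simp only [if_neg h, if_neg hN, List.mem_append] at ht
        rcases ht with ht | ht
        · exact ih N (s ++ ['0']) t ht
        · exact ih N (s ++ ['1']) t ht

theorem pvTruthy_find {N : Nat} (hN : 0 < N) (fuel : Nat) (s : List Char) (p : List Char → Bool) :
    pvTruthy ((cands N fuel s).find? p) = (cands N fuel s).find? p := by
  cases hf : (cands N fuel s).find? p with
  | none => rfl
  | some t =>
    have ht : t.length = N := cands_length fuel N s t (List.mem_of_find?_eq_some hf)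
    simp only [pvTruthy]
    rw [if_neg (by omega)]

theorem pvAHelper_eq_find : ∀ (fuel : Nat) (nums : List String) (N : Nat) (s : List Char),
    s.length ≤ N → N - s.length < fuel →
    pvAHelper nums N fuel s = (cands N fuel s).find? (fun t => decide (String.ofList t ∉ nums)) := by
  intro fuel
  induction fuel with
  | zero => intro nums N s h1 h2; omega
  | succ fuel ih =>
    intro nums N s h1 h2
    rw [pvAHelper, cands]
    by_cases hN : s.length = N
    · simp only [if_neg (by omega : ¬ s.length > N), if_pos hN]
      by_cases hm : String.ofList s ∈ nums
      · rw [if_neg (by tauto)]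
        rw [pvAHelper_gt nums fuel (s := s ++ ['0']) (by simp; omega),
            pvAHelper_gt nums fuel (s := s ++ ['1']) (by simp; omega)]
        simp [pvTruthy, List.find?, hm]
      · rw [if_pos ⟨hN, hm⟩]
        simp [List.find?, hm]
    · rw [if_neg (by omega : ¬ s.length > N), if_neg (by omega : ¬ s.length > N),
        if_neg (show ¬(s.length = N ∧ String.ofList s ∉ nums) by rintro ⟨a, -⟩; omega),
        if_neg hN]
      rw [ih nums N (s ++ ['0']) (by simp; omega) (by simp; omega),
          ih nums N (s ++ ['1']) (by simp; omega) (by simp; omega)]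
      rw [pvTruthy_find (by omega) fuel _ _, pvTruthy_find (by omega) fuel _ _]
      rw [List.find?_append]

theorem cands_eq_map : ∀ (fuel N : Nat) (s : List Char), s.length ≤ N → N - s.length < fuel →
    cands N fuel s = (List.range (2 ^ (N - s.length))).map
      (fun k => s ++ natBits (N - s.length) k) := by
  intro fuel
  induction fuel with
  | zero => intro N s h1 h2; omega
  | succ fuel ih =>
    intro N s h1 h2
    rw [cands]
    by_cases hN : s.length = N
    · simp only [if_neg (by omega : ¬ s.length > N), if_pos hN]
      rw [show N - s.length = 0 by omega]
      simp [natBits]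
    · rw [if_neg (by omega : ¬ s.length > N), if_neg hN]
      rw [ih N (s ++ ['0']) (by simp; omega) (by simp; omega),
          ih N (s ++ ['1']) (by simp; omega) (by simp; omega)]
      have hlen0 : N - (s ++ ['0']).length = (N - s.length) - 1 := by simp; omega
      have hlen1 : N - (s ++ ['1']).length = (N - s.length) - 1 := by simp; omega
      rw [hlen0, hlen1]
      obtain ⟨d, hd⟩ : ∃ d, N - s.length = d + 1 := ⟨N - s.length - 1, by omega⟩
      rw [hd]
      simp only [Nat.add_sub_cancel]
      rw [show (2:Nat) ^ (d+1) = 2^d + 2^d by ring]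
      rw [List.range_add, List.map_append, List.map_map]
      congr 1
      · apply List.map_congr_left
        intro k hk
        rw [List.mem_range] at hk
        have hb : natBits (d+1) k = '0' :: natBits d k := by
          simp only [natBits]
          rw [if_pos hk, Nat.mod_eq_of_lt hk]
        rw [hb]; simp
      · apply List.map_congr_left
        intro k hk
        rw [List.mem_range] at hk
        simp only [Function.comp]
        have hb : natBits (d+1) (2^d + k) = '1' :: natBits d k := by
          simp only [natBits]
          rw [if_neg (by omega), Nat.add_mod_left, Nat.mod_eq_of_lt hk]
        rw [hb]; simp

theorem natBits_inj : ∀ (d k j : Nat), k < 2^d → j < 2^d → natBits d k = natBits d j → k = j := by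
  intro d
  induction d with
  | zero =>
    intro k j hk hj _
    simp at hk hj; omega
  | succ d ih =>
    intro k j hk hj h
    simp only [natBits, List.cons.injEq] at h
    obtain ⟨h1, h2⟩ := h
    have hp : (0:Nat) < 2^d := Nat.two_pow_pos d
    have e2 : (2:Nat)^(d+1) = 2^d + 2^d := by ring
    by_cases hk' : k < 2^d <;> by_cases hj' : j < 2^d
    · rw [Nat.mod_eq_of_lt hk', Nat.mod_eq_of_lt hj'] at h2
      exact ih k j hk' hj' h2
    · simp [hk', hj'] at h1
    · simp [hk', hj'] at h1
    · have hk2 : k % 2^d = k - 2^d := by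
        rw [Nat.mod_eq_sub_mod (by omega), Nat.mod_eq_of_lt (by omega)]
      have hj2 : j % 2^d = j - 2^d := by
        rw [Nat.mod_eq_sub_mod (by omega), Nat.mod_eq_of_lt (by omega)]
      rw [hk2, hj2] at h2
      have := ih (k - 2^d) (j - 2^d) (by omega) (by omega) h2
      omega

theorem natBits_lsb : ∀ (d x : Nat), x < 2^(d+1) →
    natBits (d+1) x = natBits d (x/2) ++ [if x % 2 ≠ 0 then '1' else '0'] := by
  intro d
  induction d with
  | zero =>
    intro x hx
    have : x < 2 := by simpa using hx
    interval_cases x <;> decide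
  | succ d ih =>
    intro x hx
    have h2d1 : (2:Nat)^(d+1) = 2^d + 2^d := by ring
    have hp : (0:Nat) < 2^(d+1) := Nat.two_pow_pos _
    have e1 : x % 2^(d+1) / 2 = x / 2 % 2^d := by
      have h := Nat.mod_mul_right_div_self x 2 (2^d)
      rw [show (2:Nat) * 2^d = 2^(d+1) by ring] at h
      exact h
    have e2 : x % 2^(d+1) % 2 = x % 2 := Nat.mod_mod_of_dvd x ⟨2^d, by ring⟩
    calc natBits (d+2) x
        = (if x < 2^(d+1) then '0' else '1') :: natBits (d+1) (x % 2^(d+1)) := by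
          simp only [natBits]
      _ = (if x < 2^(d+1) then '0' else '1') ::
            (natBits d (x % 2^(d+1) / 2) ++ [if x % 2^(d+1) % 2 ≠ 0 then '1' else '0']) := by
          rw [ih (x % 2^(d+1)) (Nat.mod_lt _ hp)]
      _ = (if x/2 < 2^d then '0' else '1') ::
            (natBits d (x / 2 % 2^d) ++ [if x % 2 ≠ 0 then '1' else '0']) := by
          rw [e1, e2]
          congr 1
          by_cases hc : x < 2 ^ (d+1)
          · rw [if_pos hc, if_pos (by omega)]
          · rw [if_neg hc, if_neg (by omega)]
      _ = natBits (d+1) (x/2) ++ [if x % 2 ≠ 0 then '1' else '0'] := by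
          simp only [natBits, List.cons_append]

theorem foldl_bits : ∀ (l : List Nat) (x : Nat) (acc : List Char), x < 2 ^ l.length →
    ((l.foldl
      (fun (sx : List Char × Int) _ =>
        ((if PySem.Int.mod sx.2 2 ≠ 0 then '1' else '0') :: sx.1, PySem.Int.floordiv sx.2 2))
      (acc, (x : Int))).1 : List Char) = natBits l.length x ++ acc := by
  intro l
  induction l with
  | nil => intro x acc h; simp [natBits]
  | cons a l ih =>
    intro x acc h
    have hm : PySem.Int.mod (x : Int) 2 = ((x % 2 : Nat) : Int) := by
      exact_mod_cast PySem.Int.mod_natCast x 2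
    have hdv : PySem.Int.floordiv (x : Int) 2 = ((x / 2 : Nat) : Int) := by
      exact_mod_cast PySem.Int.floordiv_natCast x 2
    have hx2 : x / 2 < 2 ^ l.length := by
      have : (2:Nat) ^ (l.length + 1) = 2 ^ l.length + 2 ^ l.length := by ring
      simp only [List.length_cons] at h
      omega
    have hcast : ((if ((x % 2 : Nat) : Int) ≠ 0 then '1' else '0') : Char)
        = (if x % 2 ≠ 0 then '1' else '0') := by
      by_cases h2 : x % 2 = 0
      · rw [h2]; norm_num
      · rw [if_pos (by exact_mod_cast h2), if_pos h2]
    simp only [List.foldl_cons]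
    rw [hm, hdv, hcast, ih (x / 2) _ hx2]
    rw [List.length_cons, natBits_lsb l.length x (by simpa using h)]
    simp

theorem pvBBits_eq_natBits (n k : Nat) (hk : k < 2 ^ n) :
    pvBBits n (k : Int) = natBits n k := by
  unfold pvBBits
  have h := foldl_bits (List.range n) k [] (by simpa using hk)
  simpa using h

theorem pvBLoop_eq_find (present : List String) (n : Nat) : ∀ (ks : List Int),
    pvBLoop present n ks =
      ((ks.find? (fun k => !PySem.Set.contains present (String.ofList (pvBBits n k)))).map
        (fun k => String.ofList (pvBBits n k))) := by
  intro ks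
  induction ks with
  | nil => rfl
  | cons k ks ih =>
    rw [pvBLoop]
    by_cases hc : PySem.Set.contains present (String.ofList (pvBBits n k)) = true
    · rw [if_pos hc, ih, List.find?_cons_of_neg (by rw [hc]; simp)]
    · have hc' : PySem.Set.contains present (String.ofList (pvBBits n k)) = false := by
        revert hc; cases PySem.Set.contains present (String.ofList (pvBBits n k)) <;> simp
      rw [if_neg hc, List.find?_cons_of_pos (by rw [hc']; rfl)]
      rfl

theorem find?_congr_mem {α : Type} (l : List α) (p q : α → Bool)
    (h : ∀ x ∈ l, p x = q x) : l.find? p = l.find? q := by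
  induction l with
  | nil => rfl
  | cons a l ih =>
    have ha := h a (by simp)
    cases hq : q a with
    | true => rw [List.find?_cons_of_pos (by rw [ha, hq]), List.find?_cons_of_pos hq]
    | false =>
      rw [List.find?_cons_of_neg (by rw [ha, hq]; simp), List.find?_cons_of_neg (by simp [hq]),
        ih (fun x hx => h x (by simp [hx]))]

theorem contains_bridge (nums : List String) (s : String) :
    (!PySem.Set.contains (PySem.Set.ofList nums) s) = decide (s ∉ nums) := by
  by_cases hm : s ∈ nums
  · have hct : PySem.Set.contains (PySem.Set.ofList nums) s = true :=
      (PySem.Set.contains_iff _ _).mpr ((PySem.Set.mem_ofList _ _).mpr hm)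
    rw [hct]
    simp [hm]
  · have hcf : ¬ PySem.Set.contains (PySem.Set.ofList nums) s = true :=
      fun h => hm ((PySem.Set.mem_ofList _ _).mp ((PySem.Set.contains_iff _ _).mp h))
    have hcf' : PySem.Set.contains (PySem.Set.ofList nums) s = false := by
      revert hcf; cases PySem.Set.contains (PySem.Set.ofList nums) s <;> simp
    rw [hcf']
    simp [hm]

theorem range_find_pigeonhole (nums : List String) :
    (List.range (nums.length + 1)).find?
      (fun k => decide (String.ofList (natBits nums.length k) ∉ nums)) ≠ none := by
  intro hnone
  rw [List.find?_eq_none] at hnone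
  have hall : ∀ k < nums.length + 1, String.ofList (natBits nums.length k) ∈ nums := by
    intro k hk
    have h := hnone k (List.mem_range.mpr hk)
    simpa using h
  have hN : nums.length + 1 ≤ 2 ^ nums.length := Nat.lt_two_pow_self
  have hnd : ((List.range (nums.length + 1)).map
      (fun k => String.ofList (natBits nums.length k))).Nodup := by
    apply List.Nodup.map_on _ List.nodup_range
    intro x hx y hy hxy
    rw [List.mem_range] at hx hy
    exact natBits_inj nums.length x y (by omega) (by omega) (String.ofList_inj.mp hxy)
  have hsub : ((List.range (nums.length + 1)).map
      (fun k => String.ofList (natBits nums.length k))) ⊆ nums := by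
    intro y hy
    rw [List.mem_map] at hy
    obtain ⟨k, hk, rfl⟩ := hy
    exact hall k (List.mem_range.mp hk)
  have hle := (List.Nodup.subperm hnd hsub).length_le
  simp at hle

-- ===== VERDICT (by name: the statement is the Claim_ definition above) =====
theorem findDifferentBinaryString_spec : Claim_equal_findDifferentBinaryString := by
  unfold Claim_equal_findDifferentBinaryString
  intro nums _
  unfold Spec_findDifferentBinaryString
  unfold findDifferentBinaryString findDifferentBinaryString_alt
  simp only []
  have hN2 : nums.length + 1 ≤ 2 ^ nums.length := Nat.lt_two_pow_self
  -- the common form both sides reduce to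
  obtain ⟨k₀, hk₀⟩ : ∃ k₀, (List.range (nums.length + 1)).find?
      (fun k => decide (String.ofList (natBits nums.length k) ∉ nums)) = some k₀ :=
    Option.ne_none_iff_exists'.mp (range_find_pigeonhole nums)
  have hk₀lt : k₀ < nums.length + 1 :=
    List.mem_range.mp (List.mem_of_find?_eq_some hk₀)
  -- A side
  rw [pvAHelper_eq_find (nums.length + 1) nums nums.length [] (by simp)
        (by simp only [List.length_nil, Nat.sub_zero]; omega)]
  rw [cands_eq_map (nums.length + 1) nums.length [] (by simp)
        (by simp only [List.length_nil, Nat.sub_zero]; omega)]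
  simp only [List.length_nil, Nat.sub_zero, List.nil_append]
  rw [List.find?_map]
  rw [find?_congr_mem (List.range (2 ^ nums.length))
    ((fun t => decide (String.ofList t ∉ nums)) ∘ (fun k => natBits nums.length k))
    (fun k => decide (String.ofList (natBits nums.length k) ∉ nums))
    (fun k _ => rfl)]
  rw [show 2 ^ nums.length = (nums.length + 1) + (2 ^ nums.length - (nums.length + 1)) by omega]
  rw [List.range_add, List.find?_append, hk₀]
  -- B side
  rw [pvBLoop_eq_find]
  rw [PySem.List.pyRange_one]
  rw [show ((nums.length : Int) + 1 - 0).toNat = nums.length + 1 by omega]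
  rw [List.find?_map]
  rw [List.find?_map]
  rw [find?_congr_mem (List.range (nums.length + 1))
    ((fun k => !PySem.Set.contains (PySem.Set.ofList nums) (String.ofList (pvBBits nums.length k))) ∘
      (fun k => (0 : Int) + (k : Int)))
    (fun k => decide (String.ofList (natBits nums.length k) ∉ nums))
    (by
      intro k hk
      rw [List.mem_range] at hk
      simp only [Function.comp, zero_add]
      rw [pvBBits_eq_natBits nums.length k (by omega), contains_bridge])]
  rw [hk₀]
  simp only [Option.some_or, Option.map_some, zero_add]
  rw [pvBBits_eq_natBits nums.length k₀ (by omega)]
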